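-- pv_equiv track=rewrite | github.com/CodingThrust/problem-reductions | docs/paper/verify-reductions/verify_exact_cover_by_3_sets_subset_product.py | solve_x3c
-- ===== SOURCE A (Python) =====
-- from itertools import combinations, product
-- from typing import Optional
--
-- def solve_x3c(universe_size: int, subsets: list[list[int]]) -> Optional[list[int]]:
--     """Brute-force solve X3C. Returns config or None."""
--     n = len(subsets)
--     q = universe_size // 3
--     for config in product(range(2), repeat=n):
--         if sum(config) != q:
--             continue
--         covered = set()
--         ok = True
--         for i, sel in enumerate(config):
--             if sel == 1:
--                 for elem in subsets[i]:
--                     if elem in covered: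
--                         ok = False
--                         break
--                     covered.add(elem)
--                 if not ok:
--                     break
--         if ok and len(covered) == universe_size:
--             return list(config)
--     return None
-- ===== SOURCE B (Python) =====
-- def solve_x3c(universe_size: int, subsets: list[list[int]]) -> "Optional[list[int]]":
--     """Backtracking DFS over the subsets (skip before take), pruning branches whose
--     remaining budget is infeasible and selections that conflict with the cover so far."""
--     q = universe_size // 3
--     n = len(subsets)
--
--     def add_all(covered, elems):
--         cov = set(covered)
--         for e in elems:
--             if e in cov:
--                 return None
--             cov.add(e)
--         return cov
--
--     def go(i, need, covered):
--         rem = n - i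
--         if need < 0 or need > rem:
--             return None
--         if rem == 0:
--             return [] if len(covered) == universe_size else None
--         tail = go(i + 1, need, covered)
--         if tail is not None:
--             return [0] + tail
--         cov2 = add_all(covered, subsets[i])
--         if cov2 is None:
--             return None
--         tail = go(i + 1, need - 1, cov2)
--         if tail is not None:
--             return [1] + tail
--         return None
--
--     return go(0, q, set())
-- ===== Notes on version B (the rewrite author's own statement) =====
-- stated objective: faster
-- what changed: Replaced A's scan of all 2^n 0/1-configurations (filtering by sum==q) with a backtracking DFS over the subsets that only extends feasible prefixes, pruning on remaining budget and on cover conflicts, trying 'skip' before 'take' so the first solution found is the same lexicographically-first configuration.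
import Mathlib
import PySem

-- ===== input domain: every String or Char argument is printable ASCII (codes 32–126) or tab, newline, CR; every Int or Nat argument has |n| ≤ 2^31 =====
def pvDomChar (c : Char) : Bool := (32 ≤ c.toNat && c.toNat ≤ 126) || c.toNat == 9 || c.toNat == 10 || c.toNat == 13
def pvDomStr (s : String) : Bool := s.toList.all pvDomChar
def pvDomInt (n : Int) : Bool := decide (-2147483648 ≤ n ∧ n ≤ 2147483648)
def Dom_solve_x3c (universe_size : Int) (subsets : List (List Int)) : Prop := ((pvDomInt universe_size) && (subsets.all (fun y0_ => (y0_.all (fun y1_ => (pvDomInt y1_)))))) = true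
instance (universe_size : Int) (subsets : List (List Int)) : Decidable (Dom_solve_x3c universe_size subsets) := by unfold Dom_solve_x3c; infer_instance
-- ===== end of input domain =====

-- B is a backtracking DFS with budget/conflict pruning instead of A's scan of all 2^n
-- configurations; return values agree everywhere (A is total). Objective: faster.

-- ===== PORT A =====
-- itertools.product(range(2), repeat=n), in product order (first coordinate slowest)
def pvAll01 : Nat → List (List Int)
  | 0 => [[]]
  | n + 1 => (pvAll01 n).map (fun t => 0 :: t) ++ (pvAll01 n).map (fun t => 1 :: t)

-- the inner 'for elem in subsets[i]' loop (shared by both Pythons): none = a repeated element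
def pvAddAll (covered : PySem.Set Int) : List Int → Option (PySem.Set Int)
  | [] => some covered
  | e :: rest =>
    if PySem.Set.contains covered e then none
    else pvAddAll (PySem.Set.add covered e) rest

-- A's 'for i, sel in enumerate(config)' loop; config is paired with the subsets it indexes
def pvCoverLoop (covered : PySem.Set Int) : List (Int × List Int) → Option (PySem.Set Int)
  | [] => some covered
  | (sel, s) :: rest =>
    if sel = 1 then
      match pvAddAll covered s with
      | none => none
      | some c => pvCoverLoop c rest
    else pvCoverLoop covered rest

-- the body of A's outer loop for one config (rem/need/covered are A's subsets/q/set())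
def pvCheck (universe_size : Int) (rem : List (List Int)) (need : Int)
    (covered : PySem.Set Int) (config : List Int) : Option (List Int) :=
  if config.sum ≠ need then none
  else
    match pvCoverLoop covered (config.zip rem) with
    | none => none
    | some c => if PySem.Set.len c = universe_size then some config else none

def solve_x3c (universe_size : Int) (subsets : List (List Int)) : Option (List Int) :=
  (pvAll01 subsets.length).findSome?
    (pvCheck universe_size subsets (PySem.Int.floordiv universe_size 3) PySem.Set.empty)

-- ===== PORT B =====
-- Source B's go(i, need, covered): the suffix subsets[i:] is passed as the list 'rem'
def pvGo (universe_size : Int) : List (List Int) → Int → PySem.Set Int → Option (List Int)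
  | [], need, covered =>
    if need < 0 ∨ need > (0 : Int) then none
    else if PySem.Set.len covered = universe_size then some [] else none
  | s :: rest, need, covered =>
    if need < 0 ∨ need > ((rest.length : Int) + 1) then none
    else
      match pvGo universe_size rest need covered with
      | some tail => some (0 :: tail)
      | none =>
        match pvAddAll covered s with
        | none => none
        | some cov2 =>
          match pvGo universe_size rest (need - 1) cov2 with
          | some tail => some (1 :: tail)
          | none => none

def solve_x3c_alt (universe_size : Int) (subsets : List (List Int)) : Option (List Int) :=
  pvGo universe_size subsets (PySem.Int.floordiv universe_size 3) PySem.Set.empty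

-- ===== PRECONDITION & SPEC =====
def Spec_solve_x3c (universe_size : Int) (subsets : List (List Int)) (out : Option (List Int)) : Prop := out = solve_x3c_alt universe_size subsets
instance (universe_size : Int) (subsets : List (List Int)) (out : Option (List Int)) : Decidable (Spec_solve_x3c universe_size subsets out) := by unfold Spec_solve_x3c; infer_instance

-- ===== CLAIM (what is proved, stated in full; the proofs are below) =====
def Claim_equal_solve_x3c : Prop := ∀ (universe_size : Int) (subsets : List (List Int)), Dom_solve_x3c universe_size subsets → Spec_solve_x3c universe_size subsets (solve_x3c universe_size subsets)

-- ===== LEMMAS AND PROOFS =====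

theorem pvFindSome?_map_opt {α β γ : Type} (l : List α) (f : α → Option β) (g : β → γ) :
    l.findSome? (fun x => (f x).map g) = (l.findSome? f).map g := by
  induction l with
  | nil => rfl
  | cons a l ih =>
    simp only [List.findSome?_cons]
    cases f a <;> simp [ih]

theorem pvSum_mem_all01 {t : List Int} {m : Nat} (h : t ∈ pvAll01 m) :
    0 ≤ t.sum ∧ t.sum ≤ (m : Int) := by
  induction m generalizing t with
  | zero =>
    simp only [pvAll01, List.mem_singleton] at h
    subst h; simp
  | succ k ih =>
    simp only [pvAll01, List.mem_append, List.mem_map] at h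
    rcases h with ⟨u, hu, rfl⟩ | ⟨u, hu, rfl⟩ <;>
      · obtain ⟨h1, h2⟩ := ih hu
        simp only [List.sum_cons]
        push_cast
        omega

theorem pvCheck_cons0 (us : Int) (s : List Int) (rest : List (List Int)) (need : Int)
    (cov : PySem.Set Int) (t : List Int) :
    pvCheck us (s :: rest) need cov (0 :: t) =
      (pvCheck us rest need cov t).map (fun u => (0 : Int) :: u) := by
  simp only [pvCheck, List.sum_cons, List.zip_cons_cons, pvCoverLoop, zero_add]
  norm_num
  by_cases h : t.sum = need
  · simp only [h]
    cases pvCoverLoop cov (t.zip rest) with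
    | none => rfl
    | some c => by_cases hc : PySem.Set.len c = us <;> simp
  · simp [h]

theorem pvMatchMap (o : Option (PySem.Set Int)) (us : Int) (t : List Int) (x : Int) :
    (match o with
      | none => (none : Option (List Int))
      | some c => if PySem.Set.len c = us then some (x :: t) else none) =
    Option.map (fun u => x :: u)
      (match o with
        | none => none
        | some c => if PySem.Set.len c = us then some t else none) := by
  cases o with
  | none => rfl
  | some c =>
    show (if PySem.Set.len c = us then some (x :: t) else none)
        = Option.map (fun u => x :: u) (if PySem.Set.len c = us then some t else none)
    by_cases hc : PySem.Set.len c = us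
    · rw [if_pos hc, if_pos hc]; rfl
    · rw [if_neg hc, if_neg hc]; rfl

theorem pvCheck_cons1 (us : Int) (s : List Int) (rest : List (List Int)) (need : Int)
    (cov : PySem.Set Int) (t : List Int) :
    pvCheck us (s :: rest) need cov (1 :: t) =
      match pvAddAll cov s with
      | none => none
      | some cov2 => (pvCheck us rest (need - 1) cov2 t).map (fun u => (1 : Int) :: u) := by
  by_cases h : t.sum = need - 1
  · have h1 : ¬ (1 + t.sum ≠ need) := by omega
    have h2 : ¬ (t.sum ≠ need - 1) := by omega
    simp only [pvCheck, List.sum_cons, List.zip_cons_cons, pvCoverLoop, if_true, if_neg h1, if_neg h2]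
    cases pvAddAll cov s with
    | none => rfl
    | some cov2 => exact pvMatchMap (pvCoverLoop cov2 (t.zip rest)) us t 1
  · have h1 : (1 + t.sum ≠ need) := by omega
    have h2 : (t.sum ≠ need - 1) := by omega
    simp only [pvCheck, if_pos h1, if_pos h2, List.sum_cons]
    cases pvAddAll cov s <;> simp

theorem pvGo_eq_findSome? (us : Int) (rem : List (List Int)) (need : Int)
    (cov : PySem.Set Int) :
    pvGo us rem need cov = (pvAll01 rem.length).findSome? (pvCheck us rem need cov) := by
  induction rem generalizing need cov with
  | nil =>
    simp only [pvGo, List.length_nil, pvAll01, List.findSome?, pvCheck, List.sum_nil,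
      List.zip_nil_left, pvCoverLoop]
    by_cases h : need = 0
    · subst h
      simp only [if_neg (by omega : ¬ ((0:Int) < 0 ∨ (0:Int) > 0)),
        if_neg (by omega : ¬ ((0:Int) ≠ 0))]
      split <;> rfl
    · simp only [if_pos (by omega : (need < 0 ∨ need > (0:Int))),
        if_pos (by omega : (0:Int) ≠ need)]
  | cons s rest ih =>
    simp only [pvGo, List.length_cons, pvAll01, List.findSome?_append, List.findSome?_map]
    by_cases hg : need < 0 ∨ need > ((rest.length : Int) + 1)
    · rw [if_pos hg]
      have hnone : ∀ (x : Int), 0 ≤ x → x ≤ 1 → (pvAll01 rest.length).findSome?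
          (pvCheck us (s :: rest) need cov ∘ fun t => x :: t) = none := by
        intro x hx0 hx1
        rw [List.findSome?_eq_none_iff]
        intro t ht
        obtain ⟨h1, h2⟩ := pvSum_mem_all01 ht
        simp only [Function.comp_apply, pvCheck, List.sum_cons]
        rw [if_pos (by omega : x + t.sum ≠ need)]
      rw [hnone 0 (by norm_num) (by norm_num), hnone 1 (by norm_num) (by norm_num)]
      rfl
    · rw [if_neg hg]
      have h0 : (pvAll01 rest.length).findSome?
          (pvCheck us (s :: rest) need cov ∘ fun t => 0 :: t)
          = Option.map (fun u => (0:Int) :: u) (pvGo us rest need cov) := by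
        rw [ih, ← pvFindSome?_map_opt]
        congr 1
        funext t
        exact pvCheck_cons0 us s rest need cov t
      rw [h0]
      cases hA : pvAddAll cov s with
      | none =>
        have h1 : (pvAll01 rest.length).findSome?
            (pvCheck us (s :: rest) need cov ∘ fun t => 1 :: t) = none := by
          rw [List.findSome?_eq_none_iff]
          intro t ht
          rw [Function.comp_apply, pvCheck_cons1, hA]
        rw [h1]
        cases pvGo us rest need cov <;> rfl
      | some cov2 =>
        have h1 : (pvAll01 rest.length).findSome?
            (pvCheck us (s :: rest) need cov ∘ fun t => 1 :: t)
            = Option.map (fun u => (1:Int) :: u) (pvGo us rest (need - 1) cov2) := by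
          rw [ih, ← pvFindSome?_map_opt]
          congr 1
          funext t
          rw [Function.comp_apply, pvCheck_cons1, hA]
        rw [h1]
        cases pvGo us rest need cov with
        | some tail => rfl
        | none => cases h2 : pvGo us rest (need - 1) cov2 <;> simp [h2]

-- ===== VERDICT (by name: the statement is the Claim_ definition above) =====
theorem solve_x3c_spec : Claim_equal_solve_x3c := by
  intro us subsets _
  unfold Spec_solve_x3c solve_x3c solve_x3c_alt
  rw [pvGo_eq_findSome?]
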